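-- pv_equiv track=rewrite | github.com/daniospina9/Mental-Health-Study | app/utils.py | getting_graph_values
-- ===== SOURCE A (Python) =====
-- def getting_graph_values(final_list):
--
--   Outcome_list = list(map(lambda item: item['Outcome'], final_list))
--
--   def counter_values(Outcome_list, item):
--     counter = 0
--     for i in Outcome_list:
--       if i == item:
--         counter+=1
--     return counter
--
--   Improved_numbers = counter_values(Outcome_list, 'Improved')
--   Nochange_numbers = counter_values(Outcome_list, 'No Change')
--   Deteriorated_numbers = counter_values(Outcome_list, 'Deteriorated')
--
--   labels = ['Improved', 'No change', 'Deteriorated']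
--   values = [Improved_numbers, Nochange_numbers, Deteriorated_numbers]
--
--   return labels, values
-- ===== SOURCE B (Python) =====
-- def getting_graph_values(final_list):
--     # Divide and conquer: split in halves, merge triples of counts componentwise.
--     def go(items):
--         n = len(items)
--         if n == 0:
--             return (0, 0, 0)
--         if n == 1:
--             o = items[0]['Outcome']
--             return (int(o == 'Improved'), int(o == 'No Change'), int(o == 'Deteriorated'))
--         m = n // 2
--         l = go(items[:m])
--         r = go(items[m:])
--         return (l[0] + r[0], l[1] + r[1], l[2] + r[2])
--
--     i, n, d = go(final_list)
--     return ['Improved', 'No change', 'Deteriorated'], [i, n, d]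
-- ===== Notes on version B (the rewrite author's own statement) =====
-- stated objective: alternative
-- what changed: Replaces A's eager outcome extraction plus three independent linear counting scans with a divide-and-conquer recursion that splits the list in halves, computes a triple of category counts per half, and merges triples by componentwise addition (the 'No Change' count vs 'No change' label mismatch is preserved).
import Mathlib
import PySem

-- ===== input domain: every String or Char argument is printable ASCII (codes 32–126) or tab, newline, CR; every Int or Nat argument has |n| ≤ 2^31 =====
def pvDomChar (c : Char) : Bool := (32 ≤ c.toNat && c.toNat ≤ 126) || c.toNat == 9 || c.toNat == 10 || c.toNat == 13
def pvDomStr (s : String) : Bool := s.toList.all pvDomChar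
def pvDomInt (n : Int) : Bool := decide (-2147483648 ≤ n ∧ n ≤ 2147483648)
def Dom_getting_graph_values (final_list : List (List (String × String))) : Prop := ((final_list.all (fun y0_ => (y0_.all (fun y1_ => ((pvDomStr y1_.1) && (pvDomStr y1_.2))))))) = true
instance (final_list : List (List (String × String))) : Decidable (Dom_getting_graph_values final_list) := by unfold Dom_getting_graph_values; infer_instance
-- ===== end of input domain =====

-- B replaces A's three independent counting scans with a divide-and-conquer halving recursion merging count triples; equivalence of return values.

-- ===== PORT A =====
-- item['Outcome']; the .getD "" default is never reached under Pre_ (key present in every item)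
def gvLookup (item : List (String × String)) : String :=
  ((PySem.Dict.mk item).get? "Outcome").getD ""

-- A's inner helper counter_values: explicit loop incrementing a counter
def gvCounterValues (outcome_list : List String) (item : String) : Int :=
  outcome_list.foldl (fun counter i => if i == item then counter + 1 else counter) 0

def getting_graph_values (final_list : List (List (String × String))) : List String × List Int :=
  let outcome_list := final_list.map gvLookup
  let improved := gvCounterValues outcome_list "Improved"
  let nochange := gvCounterValues outcome_list "No Change"
  let deteriorated := gvCounterValues outcome_list "Deteriorated"
  (["Improved", "No change", "Deteriorated"], [improved, nochange, deteriorated])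

-- ===== PORT B =====
-- B's inner helper go: divide and conquer over the item list
def gvGo (items : List (List (String × String))) : Int × Int × Int :=
  match items with
  | [] => (0, 0, 0)
  | [item] =>
      let o := gvLookup item
      ((if o == "Improved" then 1 else 0),
       (if o == "No Change" then 1 else 0),
       (if o == "Deteriorated" then 1 else 0))
  | x :: y :: rest =>
      let m := (x :: y :: rest).length / 2
      let l := gvGo ((x :: y :: rest).take m)
      let r := gvGo ((x :: y :: rest).drop m)
      (l.1 + r.1, l.2.1 + r.2.1, l.2.2 + r.2.2)
termination_by items.length
decreasing_by
  · simp only [List.length_take, List.length_cons]; omega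
  · simp only [List.length_drop, List.length_cons]; omega

def getting_graph_values_alt (final_list : List (List (String × String))) : List String × List Int :=
  let t := gvGo final_list
  (["Improved", "No change", "Deteriorated"], [t.1, t.2.1, t.2.2])

-- ===== PRECONDITION & SPEC =====
-- Pre_ excludes inputs where some item lacks the 'Outcome' key: there Python A (and B) raise KeyError.
def Pre_getting_graph_values (final_list : List (List (String × String))) : Prop :=
  ∀ item ∈ final_list, item.any (fun p => p.1 == "Outcome") = true

instance (final_list : List (List (String × String))) : Decidable (Pre_getting_graph_values final_list) := by
  unfold Pre_getting_graph_values; infer_instance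

def pvWitness_getting_graph_values : (List (List (String × String))) :=
  [[("Outcome", "Improved")], [("Outcome", "No Change")]]

def Spec_getting_graph_values (final_list : List (List (String × String))) (out : List String × List Int) : Prop := out = getting_graph_values_alt final_list
instance (final_list : List (List (String × String))) (out : List String × List Int) : Decidable (Spec_getting_graph_values final_list out) := by unfold Spec_getting_graph_values; infer_instance

-- ===== CLAIM (what is proved, stated in full; the proofs are below) =====
def Claim_equal_getting_graph_values : Prop := ∀ (final_list : List (List (String × String))), Dom_getting_graph_values final_list → Pre_getting_graph_values final_list → Spec_getting_graph_values final_list (getting_graph_values final_list)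

-- ===== LEMMAS AND PROOFS =====
theorem gvCounterValues_eq_count (xs : List String) (v : String) :
    gvCounterValues xs v = (xs.count v : Int) := by
  unfold gvCounterValues
  simpa using PySem.List.foldl_beq_add_one (l := xs) (v := v) (a := 0)

theorem gvGo_eq_counts (items : List (List (String × String))) :
    gvGo items = (((items.map gvLookup).count "Improved" : Int),
                  ((items.map gvLookup).count "No Change" : Int),
                  ((items.map gvLookup).count "Deteriorated" : Int)) := by
  induction items using gvGo.induct with
  | case1 => simp [gvGo]
  | case2 item =>
      simp only [gvGo, List.map, List.count_cons, List.count_nil]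
      by_cases h1 : gvLookup item = "Improved" <;>
        by_cases h2 : gvLookup item = "No Change" <;>
          by_cases h3 : gvLookup item = "Deteriorated" <;>
            simp_all
  | case3 x y rest _m ih1 ih2 =>
      rw [gvGo]
      rw [show _m = (x :: y :: rest).length / 2 from rfl] at ih1 ih2
      simp only [ih1, ih2]
      refine Prod.ext ?_ (Prod.ext ?_ ?_) <;>
        · simp only [List.map_take, List.map_drop]
          rw [← Nat.cast_add, ← List.count_append, List.take_append_drop]

-- ===== VERDICT (by name: the statement is the Claim_ definition above) =====
theorem getting_graph_values_spec : Claim_equal_getting_graph_values := by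
  intro final_list _ _
  unfold Spec_getting_graph_values getting_graph_values getting_graph_values_alt
  simp only [gvCounterValues_eq_count, gvGo_eq_counts]
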